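-- pv_equiv track=rewrite | github.com/rotem1023/Extended-Introduction-to-Computer-Science | hw5.py | prefix_suffix_overlap_hash2
-- ===== SOURCE A (Python) =====
-- def prefix_suffix_overlap_hash2(lst, k):
--     final=[]
--     m=len(lst)
--     dic=dict()
--     for i in range(m):
--         start=lst[i][:k]
--         list1=[]
--         if start not in dic:
--             list1.append(i)
--             dic[start]=list1
--         else:
--             dic[start].append(i)
--     for end in range(m):
--         last=lst[end][-k:]
--         if dic.get(last) != None:
--             match=dic[last]
--             for num in match:
--                 if num!= end:
--                     final.append((num,end))
--     return (final)
-- ===== SOURCE B (Python) =====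
-- def prefix_suffix_overlap_hash2(lst, k):
--     final = []
--     m = len(lst)
--     for end in range(m):
--         suf = lst[end][-k:]
--         for num in range(m):
--             if num != end and lst[num][:k] == suf:
--                 final.append((num, end))
--     return final
-- ===== Notes on version B (the rewrite author's own statement) =====
-- stated objective: simpler
-- what changed: Replaced A's two-phase prefix-grouping dictionary with a single direct double loop over index pairs comparing lst[num][:k] with lst[end][-k:], maintaining only the result list.
import Mathlib
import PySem

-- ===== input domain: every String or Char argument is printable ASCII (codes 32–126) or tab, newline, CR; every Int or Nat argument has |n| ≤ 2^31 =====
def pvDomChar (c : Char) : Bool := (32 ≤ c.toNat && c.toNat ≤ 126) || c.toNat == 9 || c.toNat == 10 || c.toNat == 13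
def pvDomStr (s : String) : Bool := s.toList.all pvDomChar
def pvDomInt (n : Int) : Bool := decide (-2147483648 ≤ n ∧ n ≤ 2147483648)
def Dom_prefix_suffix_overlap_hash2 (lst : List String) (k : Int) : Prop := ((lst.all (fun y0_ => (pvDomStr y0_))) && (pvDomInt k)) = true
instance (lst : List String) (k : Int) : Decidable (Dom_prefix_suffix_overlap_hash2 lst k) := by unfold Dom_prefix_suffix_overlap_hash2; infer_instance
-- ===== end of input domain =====

-- B drops A's grouping dictionary and uses a plain double loop over index pairs (simpler; same output order).

-- ===== PORT A =====
def prefix_suffix_overlap_hash2 (lst : List String) (k : Int) : List (Int × Int) :=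
  let m : Int := (lst.length : Int)
  let dic : PySem.Dict String (List Int) :=
    (PySem.List.pyRange 0 m 1).foldl (fun dic i =>
      let start := PySem.Str.slice (PySem.List.pyGetD lst i "") none (some k)
      if dic.contains start = false then dic.insert start [i]
      else dic.modify start [] (fun l => l ++ [i])) PySem.Dict.empty
  (PySem.List.pyRange 0 m 1).foldl (fun final ed =>
    let last := PySem.Str.slice (PySem.List.pyGetD lst ed "") (some (-k)) none
    match dic.get? last with
    | some mtch =>
        mtch.foldl (fun final num => if num != ed then final ++ [(num, ed)] else final) final
    | none => final) []

-- ===== PORT B =====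
def prefix_suffix_overlap_hash2_alt (lst : List String) (k : Int) : List (Int × Int) :=
  let m : Int := (lst.length : Int)
  (PySem.List.pyRange 0 m 1).foldl (fun final ed =>
    let suf := PySem.Str.slice (PySem.List.pyGetD lst ed "") (some (-k)) none
    (PySem.List.pyRange 0 m 1).foldl (fun final num =>
      if num != ed && (PySem.Str.slice (PySem.List.pyGetD lst num "") none (some k) == suf)
      then final ++ [(num, ed)] else final) final) []

-- ===== PRECONDITION & SPEC =====
def Spec_prefix_suffix_overlap_hash2 (lst : List String) (k : Int) (out : List (Int × Int)) : Prop := out = prefix_suffix_overlap_hash2_alt lst k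
instance (lst : List String) (k : Int) (out : List (Int × Int)) : Decidable (Spec_prefix_suffix_overlap_hash2 lst k out) := by unfold Spec_prefix_suffix_overlap_hash2; infer_instance

-- ===== CLAIM (what is proved, stated in full; the proofs are below) =====
def Claim_equal_prefix_suffix_overlap_hash2 : Prop := ∀ (lst : List String) (k : Int), Dom_prefix_suffix_overlap_hash2 lst k → Spec_prefix_suffix_overlap_hash2 lst k (prefix_suffix_overlap_hash2 lst k)

-- ===== LEMMAS AND PROOFS =====

-- proof-side abbreviations: the prefix lst[i][:k], the suffix lst[ed][-k:], range(m), A's dictionary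
def pvPre (lst : List String) (k : Int) (i : Int) : String :=
  PySem.Str.slice (PySem.List.pyGetD lst i "") none (some k)
def pvSuf (lst : List String) (k : Int) (ed : Int) : String :=
  PySem.Str.slice (PySem.List.pyGetD lst ed "") (some (-k)) none
def pvR (lst : List String) : List Int := PySem.List.pyRange 0 (lst.length : Int) 1
def pvDic (lst : List String) (k : Int) : PySem.Dict String (List Int) :=
  (pvR lst).foldl (fun dic i =>
    if dic.contains (pvPre lst k i) = false then dic.insert (pvPre lst k i) [i]
    else dic.modify (pvPre lst k i) [] (fun l => l ++ [i])) PySem.Dict.empty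

-- A's branch (insert fresh / append to existing) IS modify with default []
lemma pvStep_eq (d : PySem.Dict String (List Int)) (s : String) (i : Int) :
    (if d.contains s = false then d.insert s [i] else d.modify s [] (fun l => l ++ [i]))
      = d.modify s [] (fun l => l ++ [i]) := by
  by_cases h : d.contains s = false
  · simp only [h, if_true, PySem.Dict.modify, PySem.Dict.getD_of_not_contains d [] h,
      List.nil_append]
  · simp [h]

-- the dictionary's entry at s is exactly the increasing list of indices whose prefix is s
lemma pvDic_getD (lst : List String) (k : Int) (s : String) :
    (pvDic lst k).getD s [] = (pvR lst).filter (fun i => pvPre lst k i == s) := by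
  unfold pvDic
  have hf : (fun (dic : PySem.Dict String (List Int)) (i : Int) =>
      if dic.contains (pvPre lst k i) = false then dic.insert (pvPre lst k i) [i]
      else dic.modify (pvPre lst k i) [] (fun l => l ++ [i]))
      = fun dic i => dic.modify (pvPre lst k i) [] (fun l => l ++ [i]) := by
    funext d i; exact pvStep_eq d (pvPre lst k i) i
  rw [hf]
  have hmap : (pvR lst).foldl (fun d i => d.modify (pvPre lst k i) [] (fun l => l ++ [i]))
      PySem.Dict.empty
      = ((pvR lst).map (fun i => (pvPre lst k i, i))).foldl
          (fun d p => d.modify p.1 [] (fun l => l ++ [p.2])) PySem.Dict.empty := by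
    rw [List.foldl_map]
  rw [hmap, PySem.Dict.getD_foldl_modify_append, PySem.Dict.getD_empty, List.nil_append,
    List.filter_map, List.map_map]
  simp only [Function.comp_def]; exact List.map_id _

-- one step of the output loop: A's dictionary dispatch equals B's inner scan
lemma pvStep2_eq (lst : List String) (k : Int) (final : List (Int × Int)) (ed : Int) :
    (match (pvDic lst k).get? (pvSuf lst k ed) with
      | some mtch =>
          mtch.foldl (fun final num => if num != ed then final ++ [(num, ed)] else final) final
      | none => final)
      = (pvR lst).foldl (fun final num =>
          if num != ed && (pvPre lst k num == pvSuf lst k ed)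
          then final ++ [(num, ed)] else final) final := by
  rw [PySem.List.foldl_append_if (fun num => num != ed && (pvPre lst k num == pvSuf lst k ed))
      (fun num => (num, ed))]
  cases hg : (pvDic lst k).get? (pvSuf lst k ed) with
  | none =>
      dsimp only
      have h0 : (pvR lst).filter (fun i => pvPre lst k i == pvSuf lst k ed) = [] := by
        have := PySem.Dict.getD_of_get?_eq_none (pvDic lst k) ([] : List Int) hg
        rw [pvDic_getD] at this; exact this
      have : (pvR lst).filter (fun num => num != ed && (pvPre lst k num == pvSuf lst k ed)) = [] := by
        rw [List.filter_eq_nil_iff] at h0 ⊢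
        intro a ha; have := h0 a ha; simp_all
      simp [this]
  | some mtch =>
      dsimp only
      have hm : mtch = (pvR lst).filter (fun i => pvPre lst k i == pvSuf lst k ed) := by
        have := PySem.Dict.getD_of_get?_eq_some (pvDic lst k) ([] : List Int) hg
        rw [pvDic_getD] at this; exact this.symm
      rw [PySem.List.foldl_append_if (fun num => num != ed) (fun num => (num, ed)), hm,
        List.filter_filter]

-- ===== VERDICT (by name: the statement is the Claim_ definition above) =====
theorem prefix_suffix_overlap_hash2_spec : Claim_equal_prefix_suffix_overlap_hash2 := by
  intro lst k _
  unfold Spec_prefix_suffix_overlap_hash2 prefix_suffix_overlap_hash2 prefix_suffix_overlap_hash2_alt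
  have hA : ∀ (acc : List (Int × Int)),
      (pvR lst).foldl (fun final ed =>
        match (pvDic lst k).get? (pvSuf lst k ed) with
        | some mtch =>
            mtch.foldl (fun final num => if num != ed then final ++ [(num, ed)] else final) final
        | none => final) acc
      = (pvR lst).foldl (fun final ed =>
          (pvR lst).foldl (fun final num =>
            if num != ed && (pvPre lst k num == pvSuf lst k ed)
            then final ++ [(num, ed)] else final) final) acc := by
    intro acc
    have hfun : (fun (final : List (Int × Int)) (ed : Int) =>
        match (pvDic lst k).get? (pvSuf lst k ed) with
        | some mtch =>
            mtch.foldl (fun final num => if num != ed then final ++ [(num, ed)] else final) final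
        | none => final)
        = fun final ed =>
          (pvR lst).foldl (fun final num =>
            if num != ed && (pvPre lst k num == pvSuf lst k ed)
            then final ++ [(num, ed)] else final) final := by
      funext final ed; exact pvStep2_eq lst k final ed
    rw [hfun]
  exact hA []
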